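-- pv_equiv track=rewrite | github.com/kevin-ch-day/ScytaleDroid | scytaledroid/DynamicAnalysis/tools/evidence/verify_cli.py | _hostname_like
-- ===== SOURCE A (Python) =====
-- def _hostname_like(value: str) -> bool:
--     # Lightweight sanity filter (no PSL / enrichment). This is for QA only.
--     v = (value or "").strip().lower()
--     if not v:
--         return False
--     v = v.rstrip(".")
--     if "%" in v or " " in v or "/" in v or "\\" in v or "@" in v:
--         return False
--     if ":" in v:
--         # reject host:port and ipv6-like (we expect names here)
--         return False
--     if ".." in v:
--         return False
--     allowed = set("abcdefghijklmnopqrstuvwxyz0123456789.-_")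
--     if any(ch not in allowed for ch in v):
--         return False
--     # Domain names should have at least one dot for our purposes.
--     if "." not in v:
--         return False
--     if v.startswith("-") or v.endswith("-") or v.startswith(".") or v.endswith("."):
--         return False
--     if len(v) > 253:
--         return False
--     return True
-- ===== SOURCE B (Python) =====
-- _ALLOWED = set("abcdefghijklmnopqrstuvwxyz0123456789.-_")
--
--
-- def _hostname_like(value: str) -> bool:
--     # One linear scan with a previous-char flag instead of A's many substring passes.
--     v = (value or "").strip().lower()
--     v = v.rstrip(".")
--     if not v or len(v) > 253:
--         return False
--     if v[0] in "-." or v[-1] == "-":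
--         return False
--     saw_dot = False
--     prev_dot = False
--     for ch in v:
--         if ch not in _ALLOWED:
--             return False
--         if ch == ".":
--             if prev_dot:
--                 return False
--             saw_dot = True
--             prev_dot = True
--         else:
--             prev_dot = False
--     return saw_dot
-- ===== Notes on version B (the rewrite author's own statement) =====
-- stated objective: alternative
-- what changed: Replaces A's sequence of separate passes (one substring test per forbidden character, a '..' substring test, a whole-list allowed-set scan, startswith/endswith tests) by a single left-to-right scan that carries a previous-char-was-dot flag and a saw-dot flag, with the length and boundary-character checks done up front.
import Mathlib
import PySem

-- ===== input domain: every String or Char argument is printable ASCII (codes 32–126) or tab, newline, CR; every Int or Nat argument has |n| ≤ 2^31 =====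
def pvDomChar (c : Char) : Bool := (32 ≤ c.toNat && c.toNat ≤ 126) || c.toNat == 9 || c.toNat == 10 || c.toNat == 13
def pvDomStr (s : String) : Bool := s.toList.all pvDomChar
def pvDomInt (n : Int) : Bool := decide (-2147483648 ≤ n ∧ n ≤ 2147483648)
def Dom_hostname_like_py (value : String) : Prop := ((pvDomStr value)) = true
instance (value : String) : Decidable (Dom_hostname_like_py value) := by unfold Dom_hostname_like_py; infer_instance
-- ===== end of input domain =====

-- B replaces A's many substring/membership passes by one left-to-right scan carrying a
-- previous-char-was-dot flag and a saw-dot flag; same return value on every input.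

-- ===== PORT A =====

-- exact port of v.rstrip(".") on the char list (drop trailing '.' characters)
def pvRstripDots (l : List Char) : List Char :=
  (l.reverse.dropWhile (fun c => c == '.')).reverse

def pvAllowedA : PySem.Set Char :=
  PySem.Set.ofList "abcdefghijklmnopqrstuvwxyz0123456789.-_".toList

def hostname_like_py (value : String) : Bool :=
  -- v = (value or "").strip().lower()  ('value or ""' is 'value' for a str argument)
  let v0 := PySem.Chars.lower (PySem.Chars.strip value.toList)
  if v0.isEmpty then false
  else
    let v := pvRstripDots v0
    if PySem.Chars.isIn ['%'] v || PySem.Chars.isIn [' '] v || PySem.Chars.isIn ['/'] v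
        || PySem.Chars.isIn ['\\'] v || PySem.Chars.isIn ['@'] v then false
    else if PySem.Chars.isIn [':'] v then false
    else if PySem.Chars.isIn ['.', '.'] v then false
    else if v.any (fun ch => !(PySem.Set.contains pvAllowedA ch)) then false
    else if !(PySem.Chars.isIn ['.'] v) then false
    else if PySem.Chars.startswith v ['-'] || PySem.Chars.endswith v ['-']
        || PySem.Chars.startswith v ['.'] || PySem.Chars.endswith v ['.'] then false
    else if 253 < v.length then false
    else true

-- ===== PORT B =====

def pvAllowedB : PySem.Set Char :=
  PySem.Set.ofList "abcdefghijklmnopqrstuvwxyz0123456789.-_".toList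

-- the for-loop of B: prevDot = previous char was '.', sawDot = a '.' was seen
def pvScan : List Char → Bool → Bool → Bool
  | [], _, sawDot => sawDot
  | ch :: rest, prevDot, sawDot =>
    if !(PySem.Set.contains pvAllowedB ch) then false
    else if ch == '.' then
      if prevDot then false else pvScan rest true true
    else pvScan rest false sawDot

def hostname_like_py_alt (value : String) : Bool :=
  let v0 := PySem.Chars.lower (PySem.Chars.strip value.toList)
  let v := pvRstripDots v0
  if v.isEmpty || 253 < v.length then false
  -- v[0] / v[-1] read with a default: v is nonempty here
  else if v.headD ' ' == '-' || v.headD ' ' == '.' || v.getLastD ' ' == '-' then false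
  else pvScan v false false

-- ===== PRECONDITION & SPEC =====
def Spec_hostname_like_py (value : String) (out : Bool) : Prop := out = hostname_like_py_alt value
instance (value : String) (out : Bool) : Decidable (Spec_hostname_like_py value out) := by unfold Spec_hostname_like_py; infer_instance

-- ===== CLAIM (what is proved, stated in full; the proofs are below) =====
def Claim_equal_hostname_like_py : Prop := ∀ (value : String), Dom_hostname_like_py value → Spec_hostname_like_py value (hostname_like_py value)

-- ===== LEMMAS AND PROOFS =====

lemma head?_dropWhileDots (m : List Char) : (m.dropWhile (fun c => c == '.')).head? ≠ some '.' := by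
  induction m with
  | nil => simp
  | cons a t ih =>
    rw [List.dropWhile_cons]
    by_cases ha : (a == '.') = true
    · rw [if_pos ha]; exact ih
    · rw [if_neg ha]
      simp only [List.head?_cons, ne_eq, Option.some.injEq]
      intro h
      rw [h] at ha
      simp at ha

-- the result of rstrip(".") never ends in '.'
lemma pvRstripDots_getLast? (l : List Char) : (pvRstripDots l).getLast? ≠ some '.' := by
  unfold pvRstripDots
  rw [List.getLast?_reverse]
  exact head?_dropWhileDots l.reverse

lemma singleton_prefix_iff (a : Char) (l : List Char) : [a] <+: l ↔ l.head? = some a := by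
  cases l with
  | nil => simp
  | cons b t => simp [List.cons_prefix_cons, eq_comm]

lemma singleton_suffix_iff (a : Char) (l : List Char) : [a] <:+ l ↔ l.getLast? = some a := by
  rw [← List.reverse_prefix]
  simp [singleton_prefix_iff]

-- characterization of B's scan loop
lemma pvScan_iff (l : List Char) (prevDot sawDot : Bool) :
    pvScan l prevDot sawDot = true ↔
      (∀ c ∈ l, PySem.Set.contains pvAllowedB c = true)
      ∧ ¬ ['.', '.'] <:+: l
      ∧ (prevDot = true → l.head? ≠ some '.')
      ∧ (sawDot = true ∨ '.' ∈ l) := by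
  induction l generalizing prevDot sawDot with
  | nil => cases sawDot <;> simp [pvScan]
  | cons c rest ih =>
    rw [pvScan]
    by_cases hc : PySem.Set.contains pvAllowedB c = true
    · rw [if_neg (by rw [hc]; simp)]
      by_cases hdot : c = '.'
      · subst hdot
        rw [if_pos (by decide)]
        cases prevDot with
        | true =>
          rw [if_pos rfl]
          constructor
          · intro h; exact absurd h Bool.false_ne_true
          · rintro ⟨-, -, h3, -⟩; exact ((h3 rfl) (by simp)).elim
        | false =>
          rw [if_neg (by simp), ih]
          constructor
          · rintro ⟨h1, h2, h3, -⟩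
            refine ⟨?_, ?_, by simp, Or.inr (by simp)⟩
            · intro y hy
              rcases List.mem_cons.mp hy with rfl | hy
              · exact hc
              · exact h1 y hy
            · intro hinf
              rcases List.infix_cons_iff.mp hinf with hpre | hinf'
              · rcases List.cons_prefix_cons.mp hpre with ⟨-, hpre'⟩
                exact (h3 rfl) ((singleton_prefix_iff _ _).mp hpre')
              · exact h2 hinf'
          · rintro ⟨h1, h2, -, -⟩
            refine ⟨fun y hy => h1 y (List.mem_cons_of_mem _ hy), ?_, ?_, Or.inl rfl⟩
            · intro hinf; exact h2 (List.infix_cons_iff.mpr (Or.inr hinf))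
            · intro _ hh
              apply h2
              apply List.infix_cons_iff.mpr
              left
              exact List.cons_prefix_cons.mpr ⟨rfl, (singleton_prefix_iff _ _).mpr hh⟩
      · rw [if_neg (by simp [hdot]), ih]
        constructor
        · rintro ⟨h1, h2, -, h4⟩
          refine ⟨?_, ?_, ?_, ?_⟩
          · intro y hy
            rcases List.mem_cons.mp hy with rfl | hy
            · exact hc
            · exact h1 y hy
          · intro hinf
            rcases List.infix_cons_iff.mp hinf with hpre | hinf'
            · rcases List.cons_prefix_cons.mp hpre with ⟨hcdot, -⟩; exact hdot hcdot.symm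
            · exact h2 hinf'
          · intro _ hh; simp only [List.head?_cons, Option.some.injEq] at hh; exact hdot hh
          · rcases h4 with h | h
            · exact Or.inl h
            · exact Or.inr (List.mem_cons_of_mem _ h)
        · rintro ⟨h1, h2, -, h4⟩
          refine ⟨fun y hy => h1 y (List.mem_cons_of_mem _ hy), ?_, by simp, ?_⟩
          · intro hinf; exact h2 (List.infix_cons_iff.mpr (Or.inr hinf))
          · rcases h4 with h | h
            · exact Or.inl h
            · rcases List.mem_cons.mp h with h | h
              · exact absurd h.symm hdot
              · exact Or.inr h
    · rw [if_pos (by simp only [Bool.not_eq_true] at hc; rw [hc]; rfl)]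
      constructor
      · intro h; exact absurd h Bool.false_ne_true
      · rintro ⟨h1, -, -, -⟩
        exact absurd (h1 c (by simp)) hc

-- the common characterization of both bodies on a nonempty post-rstrip list c :: t with last element x
def pvCond (c : Char) (t : List Char) (x : Char) : Prop :=
  (∀ y ∈ c :: t, PySem.Set.contains pvAllowedA y = true)
  ∧ ¬ ['.', '.'] <:+: (c :: t)
  ∧ '.' ∈ c :: t
  ∧ c ≠ '-' ∧ c ≠ '.' ∧ x ≠ '-'
  ∧ (c :: t).length ≤ 253

set_option maxRecDepth 8192 in
lemma lemA (c x : Char) (t : List Char) (hx : (c :: t).getLast? = some x) (hxdot : x ≠ '.') :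
    ((if PySem.Chars.isIn ['%'] (c :: t) || PySem.Chars.isIn [' '] (c :: t) || PySem.Chars.isIn ['/'] (c :: t)
        || PySem.Chars.isIn ['\\'] (c :: t) || PySem.Chars.isIn ['@'] (c :: t) then false
      else if PySem.Chars.isIn [':'] (c :: t) then false
      else if PySem.Chars.isIn ['.', '.'] (c :: t) then false
      else if (c :: t).any (fun ch => !(PySem.Set.contains pvAllowedA ch)) then false
      else if !(PySem.Chars.isIn ['.'] (c :: t)) then false
      else if PySem.Chars.startswith (c :: t) ['-'] || PySem.Chars.endswith (c :: t) ['-']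
          || PySem.Chars.startswith (c :: t) ['.'] || PySem.Chars.endswith (c :: t) ['.'] then false
      else if 253 < (c :: t).length then false
      else true) = true)
    ↔ pvCond c t x := by
  constructor
  · intro h
    split_ifs at h with h1 h2 h3 h4 h5 h6 h7
    refine ⟨?_, ?_, ?_, ?_, ?_, ?_, by omega⟩
    · intro y hy
      by_contra hy'
      apply h4
      simp only [List.any_eq_true]
      refine ⟨y, hy, ?_⟩
      simp only [Bool.not_eq_true] at hy'
      rw [hy']
      decide
    · intro hdd
      exact h3 ((PySem.Chars.isIn_iff_infix _ _).mpr hdd)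
    · have hisin : PySem.Chars.isIn ['.'] (c :: t) = true := by
        by_contra hb
        simp only [Bool.not_eq_true] at hb
        exact h5 (by rw [hb]; decide)
      exact (List.singleton_infix_iff _ _).mp ((PySem.Chars.isIn_iff_infix _ _).mp hisin)
    · intro hcd
      apply h6
      have : PySem.Chars.startswith (c :: t) ['-'] = true :=
        (PySem.Chars.startswith_iff _ _).mpr ((singleton_prefix_iff _ _).mpr (by simp [hcd]))
      simp [this]
    · intro hcd
      apply h6
      have : PySem.Chars.startswith (c :: t) ['.'] = true :=
        (PySem.Chars.startswith_iff _ _).mpr ((singleton_prefix_iff _ _).mpr (by simp [hcd]))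
      simp [this]
    · intro hxd
      apply h6
      have : PySem.Chars.endswith (c :: t) ['-'] = true :=
        (PySem.Chars.endswith_iff _ _).mpr ((singleton_suffix_iff _ _).mpr (by rw [hx, hxd]))
      simp [this]
  · rintro ⟨hall, hdd, hmem, hcdash, hcdot, hxdash, hlen⟩
    split_ifs with h1 h2 h3 h4 h5 h6 h7
    · exfalso
      rcases (by simpa only [Bool.or_eq_true] using h1 :
          ((((PySem.Chars.isIn ['%'] (c :: t) = true ∨ PySem.Chars.isIn [' '] (c :: t) = true)
            ∨ PySem.Chars.isIn ['/'] (c :: t) = true) ∨ PySem.Chars.isIn ['\\'] (c :: t) = true)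
            ∨ PySem.Chars.isIn ['@'] (c :: t) = true)) with ((((h | h) | h) | h) | h) <;>
        exact absurd (hall _ ((List.singleton_infix_iff _ _).mp ((PySem.Chars.isIn_iff_infix _ _).mp h))) (by decide)
    · exact absurd (hall _ ((List.singleton_infix_iff _ _).mp ((PySem.Chars.isIn_iff_infix _ _).mp h2))) (by decide)
    · exact absurd ((PySem.Chars.isIn_iff_infix _ _).mp h3) hdd
    · exfalso
      simp only [List.any_eq_true] at h4
      obtain ⟨y, hy, hy'⟩ := h4
      simp only [Bool.not_eq_true'] at hy'
      exact absurd (hall y hy) (by rw [hy']; simp)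
    · exfalso
      have : ¬ ['.'] <:+: (c :: t) := (PySem.Chars.isIn_eq_false_iff _ _).mp (by simpa using h5)
      exact this ((List.singleton_infix_iff _ _).mpr hmem)
    · exfalso
      rcases (by simpa only [Bool.or_eq_true] using h6 :
          (((PySem.Chars.startswith (c :: t) ['-'] = true ∨ PySem.Chars.endswith (c :: t) ['-'] = true)
            ∨ PySem.Chars.startswith (c :: t) ['.'] = true) ∨ PySem.Chars.endswith (c :: t) ['.'] = true))
        with (((h | h) | h) | h)
      · have := (singleton_prefix_iff _ _).mp ((PySem.Chars.startswith_iff _ _).mp h)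
        simp only [List.head?_cons, Option.some.injEq] at this
        exact hcdash this
      · have := (singleton_suffix_iff _ _).mp ((PySem.Chars.endswith_iff _ _).mp h)
        rw [hx] at this
        exact hxdash (Option.some.inj this)
      · have := (singleton_prefix_iff _ _).mp ((PySem.Chars.startswith_iff _ _).mp h)
        simp only [List.head?_cons, Option.some.injEq] at this
        exact hcdot this
      · have := (singleton_suffix_iff _ _).mp ((PySem.Chars.endswith_iff _ _).mp h)
        rw [hx] at this
        exact hxdot (Option.some.inj this)
    · omega
    · rfl

lemma lemB (c x : Char) (t : List Char) (hx : (c :: t).getLast? = some x) :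
    ((if (c :: t).isEmpty || 253 < (c :: t).length then false
      else if (c :: t).headD ' ' == '-' || (c :: t).headD ' ' == '.' || (c :: t).getLastD ' ' == '-' then false
      else pvScan (c :: t) false false) = true)
    ↔ pvCond c t x := by
  have hxD : (c :: t).getLastD ' ' = x := by rw [List.getLastD_eq_getLast?, hx]; rfl
  by_cases h1 : ((c :: t).isEmpty || decide (253 < (c :: t).length)) = true
  · rw [if_pos h1]
    simp only [List.isEmpty_cons, Bool.false_or, decide_eq_true_eq] at h1
    constructor
    · intro h; exact absurd h Bool.false_ne_true
    · rintro ⟨-, -, -, -, -, -, hlen⟩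
      exact absurd hlen (by omega)
  · rw [if_neg h1]
    simp only [List.isEmpty_cons, Bool.false_or, decide_eq_true_eq] at h1
    by_cases h2 : ((c :: t).headD ' ' == '-' || (c :: t).headD ' ' == '.' || (c :: t).getLastD ' ' == '-') = true
    · rw [if_pos h2]
      simp only [List.headD_cons, hxD, Bool.or_eq_true, beq_iff_eq] at h2
      constructor
      · intro h; exact absurd h Bool.false_ne_true
      · rintro ⟨-, -, -, hcdash, hcdot, hxdash, -⟩
        rcases h2 with (h | h) | h
        · exact absurd h hcdash
        · exact absurd h hcdot
        · exact absurd h hxdash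
    · rw [if_neg h2]
      simp only [List.headD_cons, hxD, Bool.or_eq_true, beq_iff_eq, not_or] at h2
      obtain ⟨⟨hcdash, hcdot⟩, hxdash⟩ := h2
      rw [pvScan_iff]
      constructor
      · rintro ⟨hall, hdd, -, hsaw⟩
        have hmem : '.' ∈ c :: t := by
          rcases hsaw with h | h
          · exact absurd h Bool.false_ne_true
          · exact h
        exact ⟨hall, hdd, hmem, hcdash, hcdot, hxdash, by omega⟩
      · rintro ⟨hall, hdd, hmem, -, -, -, -⟩
        exact ⟨hall, hdd, fun h => absurd h Bool.false_ne_true, Or.inr hmem⟩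

lemma main_eq (w : List Char) :
    (if w.isEmpty then false
     else
       if PySem.Chars.isIn ['%'] (pvRstripDots w) || PySem.Chars.isIn [' '] (pvRstripDots w)
           || PySem.Chars.isIn ['/'] (pvRstripDots w) || PySem.Chars.isIn ['\\'] (pvRstripDots w)
           || PySem.Chars.isIn ['@'] (pvRstripDots w) then false
       else if PySem.Chars.isIn [':'] (pvRstripDots w) then false
       else if PySem.Chars.isIn ['.', '.'] (pvRstripDots w) then false
       else if (pvRstripDots w).any (fun ch => !(PySem.Set.contains pvAllowedA ch)) then false
       else if !(PySem.Chars.isIn ['.'] (pvRstripDots w)) then false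
       else if PySem.Chars.startswith (pvRstripDots w) ['-'] || PySem.Chars.endswith (pvRstripDots w) ['-']
           || PySem.Chars.startswith (pvRstripDots w) ['.'] || PySem.Chars.endswith (pvRstripDots w) ['.'] then false
       else if 253 < (pvRstripDots w).length then false
       else true)
    = (if (pvRstripDots w).isEmpty || 253 < (pvRstripDots w).length then false
       else if (pvRstripDots w).headD ' ' == '-' || (pvRstripDots w).headD ' ' == '.'
           || (pvRstripDots w).getLastD ' ' == '-' then false
       else pvScan (pvRstripDots w) false false) := by
  by_cases hempty : w.isEmpty = true
  · rw [if_pos hempty]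
    have hw : w = [] := by simpa using hempty
    subst hw
    rfl
  · rw [if_neg hempty]
    have hlast := pvRstripDots_getLast? w
    cases hl : pvRstripDots w with
    | nil => decide
    | cons c t =>
      rw [hl] at hlast
      rcases hgl : (c :: t).getLast? with _ | x
      · simp at hgl
      · rw [hgl] at hlast
        have hxdot : x ≠ '.' := fun h => hlast (by rw [h])
        exact Bool.eq_iff_iff.mpr ((lemA c x t hgl hxdot).trans (lemB c x t hgl).symm)

-- ===== VERDICT (by name: the statement is the Claim_ definition above) =====
theorem hostname_like_py_spec : Claim_equal_hostname_like_py := by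
  intro value _
  show hostname_like_py value = hostname_like_py_alt value
  exact main_eq (PySem.Chars.lower (PySem.Chars.strip value.toList))
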